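-- pv_equiv track=rewrite | github.com/AskNowQA/KrantikariQA | datasetPreparation/entity_subgraph.py | filter_predicates
-- ===== SOURCE A (Python) =====
-- def filter_predicates(_predicates, predicate_blacklist,_use_blacklist=True, _only_dbo=False, _qald=False):
--     """
--         Function used to filter out predicates based on some logic
--             - use a blacklist/whitelist @TODO: Make and plug one in.
--             - only use dbo predicates, even.
--
--     :param _predicates: A list of strings (uri of predicates)
--     :param _use_blacklist: bool
--     :param _only_dbo: bool
--     :param _qald: Dataset specifc stuff as qald allows 'http://purl.org/dc/terms/subject' and 'http://www.w3.org/1999/02/22-rdf-syntax-ns#type' as primary relation.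
--     :return: A list of strings (uri)
--
--
--     Note that predicate blacklist for QALD would be different when compared to LC-QuAD
--     """
--
--     if _use_blacklist and not _qald:
--         _predicates = [x for x in _predicates
--                        if x not in predicate_blacklist]
--
--     if _only_dbo and not _qald:
--         _predicates = [x for x in _predicates
--                        if x.startswith('http://dbpedia.org/ontology')
--                        or x.startswith('dbo:')]
--
--     if _qald:
--         if _use_blacklist:
--             _predicates = [x for x in _predicates
--                            if x not in predicate_blacklist]
--         predicates_new = []
--         for x in _predicates:
--             if x.startswith('http://purl.org/dc/terms/subject'):
--                 predicates_new.append(x)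
--             if _only_dbo:
--                 if x.startswith('http://dbpedia.org/ontology') or x.startswith('dbo:') or \
--                         x.startswith('http://www.w3.org/1999/02/22-rdf-syntax-ns#type'):
--                     predicates_new.append(x)
--             else:
--                 if not x.startswith('http://purl.org/dc/terms/'):
--                     predicates_new.append(x)
--         _predicates = predicates_new
--
--     # Filter out uniques
--     # _predicates = _predicates
--
--     return _predicates
-- ===== SOURCE B (Python) =====
-- def filter_predicates(_predicates, predicate_blacklist, _use_blacklist=True, _only_dbo=False, _qald=False):
--     """Single pass: one combined per-element keep decision instead of sequential list rewrites."""
--     def keep(x):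
--         if _use_blacklist and x in predicate_blacklist:
--             return False
--         if _qald:
--             if x.startswith('http://purl.org/dc/terms/subject'):
--                 return True
--             if _only_dbo:
--                 return (x.startswith('http://dbpedia.org/ontology')
--                         or x.startswith('dbo:')
--                         or x.startswith('http://www.w3.org/1999/02/22-rdf-syntax-ns#type'))
--             return not x.startswith('http://purl.org/dc/terms/')
--         if _only_dbo:
--             return x.startswith('http://dbpedia.org/ontology') or x.startswith('dbo:')
--         return True
--     return [x for x in _predicates if keep(x)]
-- ===== Notes on version B (the rewrite author's own statement) =====
-- stated objective: simpler
-- what changed: Replaces A's up-to-three sequential list rewrites (two filters plus a double-append accumulation loop) by a single traversal with one combined per-element keep predicate.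
import Mathlib
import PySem

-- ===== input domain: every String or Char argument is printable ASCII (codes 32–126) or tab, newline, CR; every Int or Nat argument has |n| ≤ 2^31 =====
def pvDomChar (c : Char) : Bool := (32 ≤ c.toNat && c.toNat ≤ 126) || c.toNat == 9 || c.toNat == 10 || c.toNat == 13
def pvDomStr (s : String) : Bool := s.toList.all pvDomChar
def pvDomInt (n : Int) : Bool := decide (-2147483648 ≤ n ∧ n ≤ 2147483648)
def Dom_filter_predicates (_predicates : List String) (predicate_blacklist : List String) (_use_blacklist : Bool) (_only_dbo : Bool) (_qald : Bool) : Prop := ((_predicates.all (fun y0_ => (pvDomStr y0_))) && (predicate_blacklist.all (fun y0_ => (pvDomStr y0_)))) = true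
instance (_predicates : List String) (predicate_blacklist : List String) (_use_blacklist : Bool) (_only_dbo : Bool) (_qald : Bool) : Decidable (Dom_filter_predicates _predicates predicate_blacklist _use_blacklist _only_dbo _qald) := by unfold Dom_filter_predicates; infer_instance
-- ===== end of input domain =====

-- B merges A's sequential list rewrites into one pass with a single per-element keep predicate (objective: simpler; same return value).

-- ===== PORT A =====
-- literal transliteration of A: up to two sequential filters, then for qald an
-- optional blacklist filter and an append-accumulating loop over the elements.
def filter_predicates (_predicates : List String) (predicate_blacklist : List String) (_use_blacklist : Bool) (_only_dbo : Bool) (_qald : Bool) : List String :=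
  let ps1 := if _use_blacklist && !_qald then
      _predicates.filter (fun x => !(predicate_blacklist.contains x))
    else _predicates
  let ps2 := if _only_dbo && !_qald then
      ps1.filter (fun x => PySem.Str.startswith x "http://dbpedia.org/ontology" || PySem.Str.startswith x "dbo:")
    else ps1
  if _qald then
    let ps3 := if _use_blacklist then
        ps2.filter (fun x => !(predicate_blacklist.contains x))
      else ps2
    ps3.foldl (fun predicates_new x =>
      let predicates_new :=
        if PySem.Str.startswith x "http://purl.org/dc/terms/subject" then predicates_new ++ [x]
        else predicates_new
      if _only_dbo then
        if PySem.Str.startswith x "http://dbpedia.org/ontology" || PySem.Str.startswith x "dbo:" ||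
           PySem.Str.startswith x "http://www.w3.org/1999/02/22-rdf-syntax-ns#type" then
          predicates_new ++ [x]
        else predicates_new
      else
        if !(PySem.Str.startswith x "http://purl.org/dc/terms/") then predicates_new ++ [x]
        else predicates_new) []
  else ps2

-- ===== PORT B =====
-- B's combined per-element decision (the `keep` closure in Source B).
def keep_pred (predicate_blacklist : List String) (_use_blacklist : Bool) (_only_dbo : Bool) (_qald : Bool) (x : String) : Bool :=
  if _use_blacklist && predicate_blacklist.contains x then false
  else if _qald then
    if PySem.Str.startswith x "http://purl.org/dc/terms/subject" then true
    else if _only_dbo then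
      PySem.Str.startswith x "http://dbpedia.org/ontology" || PySem.Str.startswith x "dbo:" ||
      PySem.Str.startswith x "http://www.w3.org/1999/02/22-rdf-syntax-ns#type"
    else !(PySem.Str.startswith x "http://purl.org/dc/terms/")
  else if _only_dbo then
    PySem.Str.startswith x "http://dbpedia.org/ontology" || PySem.Str.startswith x "dbo:"
  else true

def filter_predicates_alt (_predicates : List String) (predicate_blacklist : List String) (_use_blacklist : Bool) (_only_dbo : Bool) (_qald : Bool) : List String :=
  _predicates.filter (keep_pred predicate_blacklist _use_blacklist _only_dbo _qald)

-- ===== PRECONDITION & SPEC =====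
def Spec_filter_predicates (_predicates : List String) (predicate_blacklist : List String) (_use_blacklist : Bool) (_only_dbo : Bool) (_qald : Bool) (out : List String) : Prop := out = filter_predicates_alt _predicates predicate_blacklist _use_blacklist _only_dbo _qald
instance (_predicates : List String) (predicate_blacklist : List String) (_use_blacklist : Bool) (_only_dbo : Bool) (_qald : Bool) (out : List String) : Decidable (Spec_filter_predicates _predicates predicate_blacklist _use_blacklist _only_dbo _qald out) := by unfold Spec_filter_predicates; infer_instance

-- ===== CLAIM (what is proved, stated in full; the proofs are below) =====
def Claim_equal_filter_predicates : Prop := ∀ (_predicates : List String) (predicate_blacklist : List String) (_use_blacklist : Bool) (_only_dbo : Bool) (_qald : Bool), Dom_filter_predicates _predicates predicate_blacklist _use_blacklist _only_dbo _qald → Spec_filter_predicates _predicates predicate_blacklist _use_blacklist _only_dbo _qald (filter_predicates _predicates predicate_blacklist _use_blacklist _only_dbo _qald)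

-- ===== LEMMAS AND PROOFS =====

-- two string prefixes of the same string are comparable; used for mutual exclusivity
lemma startswith_not_both (p q x : String)
    (hpq : ¬ (p.toList <+: q.toList)) (hqp : ¬ (q.toList <+: p.toList)) :
    ¬ (PySem.Str.startswith x p = true ∧ PySem.Str.startswith x q = true) := by
  rintro ⟨h1, h2⟩
  rw [PySem.Str.startswith_eq, PySem.Chars.startswith_iff] at h1 h2
  rcases List.prefix_or_prefix_of_prefix h1 h2 with h | h
  · exact hpq h
  · exact hqp h

-- in the qald loop the two possible appends of one element never both fire
lemma excl_dbo (x : String) :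
    ¬ (PySem.Str.startswith x "http://purl.org/dc/terms/subject" = true ∧
       (PySem.Str.startswith x "http://dbpedia.org/ontology" || PySem.Str.startswith x "dbo:" ||
        PySem.Str.startswith x "http://www.w3.org/1999/02/22-rdf-syntax-ns#type") = true) := by
  rintro ⟨h1, h2⟩
  rcases Bool.or_eq_true_iff.mp h2 with h | h
  · rcases Bool.or_eq_true_iff.mp h with h | h
    · exact startswith_not_both _ _ x (by decide) (by decide) ⟨h1, h⟩
    · exact startswith_not_both _ _ x (by decide) (by decide) ⟨h1, h⟩
  · exact startswith_not_both _ _ x (by decide) (by decide) ⟨h1, h⟩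

lemma excl_ndbo (x : String) :
    ¬ (PySem.Str.startswith x "http://purl.org/dc/terms/subject" = true ∧
       (!(PySem.Str.startswith x "http://purl.org/dc/terms/")) = true) := by
  rintro ⟨h1, h2⟩
  have hp : "http://purl.org/dc/terms/subject".toList <+: x.toList := by
    rw [PySem.Str.startswith_eq, PySem.Chars.startswith_iff] at h1; exact h1
  have hq : "http://purl.org/dc/terms/".toList <+: x.toList :=
    List.IsPrefix.trans (by decide) hp
  have hsw : PySem.Str.startswith x "http://purl.org/dc/terms/" = true := by
    rw [PySem.Str.startswith_eq, PySem.Chars.startswith_iff]; exact hq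
  rw [hsw] at h2; simp at h2

-- the append-accumulating loop with two mutually exclusive append conditions is a filter
lemma foldl_two_append (c1 c2 : String → Bool)
    (hx : ∀ x, ¬ (c1 x = true ∧ c2 x = true)) :
    ∀ (l acc : List String),
      l.foldl (fun a x =>
        let a := if c1 x then a ++ [x] else a
        if c2 x then a ++ [x] else a) acc
      = acc ++ l.filter (fun x => c1 x || c2 x) := by
  intro l
  induction l with
  | nil => simp
  | cons y t ih =>
    intro acc
    have h := hx y
    cases h1 : c1 y <;> cases h2 : c2 y <;>
      simp [List.foldl_cons, h1, h2, ih] <;>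
      first
        | rfl
        | (exact absurd ⟨h1, h2⟩ h)

theorem filter_predicates_eq (_predicates : List String) (predicate_blacklist : List String)
    (_use_blacklist : Bool) (_only_dbo : Bool) (_qald : Bool) :
    filter_predicates _predicates predicate_blacklist _use_blacklist _only_dbo _qald
      = filter_predicates_alt _predicates predicate_blacklist _use_blacklist _only_dbo _qald := by
  cases _qald with
  | true =>
    cases _only_dbo with
    | true =>
      cases _use_blacklist with
      | true =>
        show (_predicates.filter (fun x => !(predicate_blacklist.contains x))).foldl
            (fun predicates_new x =>
              let predicates_new :=
                if PySem.Str.startswith x "http://purl.org/dc/terms/subject" then predicates_new ++ [x]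
                else predicates_new
              if PySem.Str.startswith x "http://dbpedia.org/ontology" || PySem.Str.startswith x "dbo:" ||
                 PySem.Str.startswith x "http://www.w3.org/1999/02/22-rdf-syntax-ns#type" then
                predicates_new ++ [x]
              else predicates_new) []
          = _predicates.filter (keep_pred predicate_blacklist true true true)
        rw [foldl_two_append _ _ excl_dbo, List.nil_append, List.filter_filter]
        exact List.filter_congr (fun x _ => by by_cases hb : x ∈ predicate_blacklist <;> simp [keep_pred, hb])
      | false =>
        show _predicates.foldl
            (fun predicates_new x =>
              let predicates_new :=
                if PySem.Str.startswith x "http://purl.org/dc/terms/subject" then predicates_new ++ [x]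
                else predicates_new
              if PySem.Str.startswith x "http://dbpedia.org/ontology" || PySem.Str.startswith x "dbo:" ||
                 PySem.Str.startswith x "http://www.w3.org/1999/02/22-rdf-syntax-ns#type" then
                predicates_new ++ [x]
              else predicates_new) []
          = _predicates.filter (keep_pred predicate_blacklist false true true)
        rw [foldl_two_append _ _ excl_dbo, List.nil_append]
        exact List.filter_congr (fun x _ => by simp [keep_pred])
    | false =>
      cases _use_blacklist with
      | true =>
        show (_predicates.filter (fun x => !(predicate_blacklist.contains x))).foldl
            (fun predicates_new x =>
              let predicates_new :=
                if PySem.Str.startswith x "http://purl.org/dc/terms/subject" then predicates_new ++ [x]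
                else predicates_new
              if !(PySem.Str.startswith x "http://purl.org/dc/terms/") then predicates_new ++ [x]
              else predicates_new) []
          = _predicates.filter (keep_pred predicate_blacklist true false true)
        rw [foldl_two_append _ _ excl_ndbo, List.nil_append, List.filter_filter]
        exact List.filter_congr (fun x _ => by by_cases hb : x ∈ predicate_blacklist <;> simp [keep_pred, hb])
      | false =>
        show _predicates.foldl
            (fun predicates_new x =>
              let predicates_new :=
                if PySem.Str.startswith x "http://purl.org/dc/terms/subject" then predicates_new ++ [x]
                else predicates_new
              if !(PySem.Str.startswith x "http://purl.org/dc/terms/") then predicates_new ++ [x]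
              else predicates_new) []
          = _predicates.filter (keep_pred predicate_blacklist false false true)
        rw [foldl_two_append _ _ excl_ndbo, List.nil_append]
        exact List.filter_congr (fun x _ => by simp [keep_pred])
  | false =>
    cases _use_blacklist with
    | true =>
      cases _only_dbo with
      | true =>
        show (_predicates.filter (fun x => !(predicate_blacklist.contains x))).filter
            (fun x => PySem.Str.startswith x "http://dbpedia.org/ontology" || PySem.Str.startswith x "dbo:")
          = _predicates.filter (keep_pred predicate_blacklist true true false)
        rw [List.filter_filter]
        exact List.filter_congr (fun x _ => by by_cases hb : x ∈ predicate_blacklist <;> simp [keep_pred, hb])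
      | false =>
        show _predicates.filter (fun x => !(predicate_blacklist.contains x))
          = _predicates.filter (keep_pred predicate_blacklist true false false)
        exact List.filter_congr (fun x _ => by by_cases hb : x ∈ predicate_blacklist <;> simp [keep_pred, hb])
    | false =>
      cases _only_dbo with
      | true =>
        show _predicates.filter
            (fun x => PySem.Str.startswith x "http://dbpedia.org/ontology" || PySem.Str.startswith x "dbo:")
          = _predicates.filter (keep_pred predicate_blacklist false true false)
        exact List.filter_congr (fun x _ => by simp [keep_pred])
      | false =>
        show _predicates = _predicates.filter (keep_pred predicate_blacklist false false false)
        exact (List.filter_eq_self.mpr (fun x _ => by simp [keep_pred])).symm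

-- ===== VERDICT (by name: the statement is the Claim_ definition above) =====
theorem filter_predicates_spec : Claim_equal_filter_predicates := by
  intro ps bl ub od q _
  unfold Spec_filter_predicates
  exact filter_predicates_eq ps bl ub od q
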